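-- pv_equiv track=rewrite | github.com/Recluse/toxic-bot | handlers/commands_explain.py | _repair_html_tags
-- ===== SOURCE A (Python) =====
-- def _repair_html_tags(text: str) -> str:
--     """Make HTML tags balanced so Telegram can parse them.
--
--     Telegram rejects messages with mismatched tags (e.g. <b>...</i>). This
--     tries to fix simple cases by ignoring a mismatched closing tag and by
--     automatically closing any remaining open tags at the end.
--
--     Supported tags are those that Telegram accepts (and a few we generate
--     ourselves): <b>, <i>, <u>, <s>, <strong>, <em>, <code>, <pre>, <a>.
--     """
--
--     supported_tags = {"b", "i", "u", "s", "strong", "em", "code", "pre", "a"}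
--
--     tags: list[str] = []
--     out: list[str] = []
--     i = 0
--     while i < len(text):
--         if text[i] == "<":
--             end = text.find(">", i + 1)
--             if end == -1:
--                 out.append(text[i:])
--                 break
--
--             tag = text[i + 1:end].strip()
--             is_closing = tag.startswith("/")
--             tag_name = tag[1:] if is_closing else tag
--             tag_name = tag_name.split()[0].lower()
--
--             if tag_name in supported_tags:
--                 if is_closing:
--                     if tags and tags[-1] == tag_name:
--                         tags.pop()
--                         out.append(text[i:end + 1])
--                     else:
--                         # Ignore mismatched closing tag (Telegram will reject it)
--                         pass
--                 else:
--                     tags.append(tag_name)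
--                     out.append(text[i:end + 1])
--             else:
--                 # Drop unsupported tag entirely.
--                 pass
--
--             i = end + 1
--         else:
--             out.append(text[i])
--             i += 1
--
--     while tags:
--         out.append(f"</{tags.pop()}>")
--
--     return "".join(out)
-- ===== SOURCE B (Python) =====
-- def _repair_html_tags(text: str) -> str:
--     """Two-phase rewrite: tokenize the whole string into text/tag tokens first,
--     then process the token stream with an open-tag stack."""
--
--     supported_tags = {"b", "i", "u", "s", "strong", "em", "code", "pre", "a"}
--
--     # Phase 1: tokenize into ("text", literal) and ("tag", inner) tokens.
--     tokens = []
--     i = 0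
--     n = len(text)
--     while i < n:
--         lt = text.find("<", i)
--         if lt == -1:
--             tokens.append(("text", text[i:]))
--             break
--         tokens.append(("text", text[i:lt]))
--         end = text.find(">", lt + 1)
--         if end == -1:
--             tokens.append(("text", text[lt:]))
--             break
--         tokens.append(("tag", text[lt + 1:end]))
--         i = end + 1
--
--     # Phase 2: process the token stream with the open-tag stack (top first).
--     stack = []
--     out = []
--     for kind, payload in tokens:
--         if kind == "text":
--             out.append(payload)
--             continue
--         tag = payload.strip()
--         is_closing = tag.startswith("/")
--         tag_name = tag[1:] if is_closing else tag
--         tag_name = tag_name.split()[0].lower()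
--         if tag_name in supported_tags:
--             if is_closing:
--                 if stack and stack[0] == tag_name:
--                     stack.pop(0)
--                     out.append("<" + payload + ">")
--             else:
--                 stack.insert(0, tag_name)
--                 out.append("<" + payload + ">")
--
--     return "".join(out) + "".join(f"</{name}>" for name in stack)
-- ===== Notes on version B (the rewrite author's own statement) =====
-- stated objective: faster
-- what changed: A's single fused char-by-char scan (emitting one character at a time while juggling the tag stack inline) is replaced by a two-phase decomposition: first tokenize the whole string into an ordered list of text-chunk and tag tokens (text gaps located with find and emitted as whole slices), then a second pass folds the open-tag stack over that token stream and finally appends the auto-closing tags.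
-- outside the precondition, e.g. on _repair_html_tags('<a <>'): A returns '<a <></a>', B returns '<a <></a>'
import Mathlib
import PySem

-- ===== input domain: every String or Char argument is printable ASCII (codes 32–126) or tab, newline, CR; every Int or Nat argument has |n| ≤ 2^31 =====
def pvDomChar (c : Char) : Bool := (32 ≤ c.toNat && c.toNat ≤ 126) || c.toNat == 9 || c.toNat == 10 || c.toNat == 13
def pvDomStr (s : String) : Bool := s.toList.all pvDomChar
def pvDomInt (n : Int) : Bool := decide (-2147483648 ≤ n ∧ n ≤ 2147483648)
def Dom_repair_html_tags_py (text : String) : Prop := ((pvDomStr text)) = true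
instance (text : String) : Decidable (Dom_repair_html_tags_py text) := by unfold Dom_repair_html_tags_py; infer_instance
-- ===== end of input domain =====

-- B is a two-phase (tokenize, then fold a stack over the token stream) re-implementation of A's
-- fused char-scan; same return value wherever the Python A returns (Pre_ excludes A's IndexError inputs).

-- shared primitive: models `text.find(">", i+1)` plus the two slices text[i+1:end], text[end+1:]
-- (splits at the FIRST '>', none = find returned -1); used by both ports.
def splitAtGt : List Char → Option (List Char × List Char)
  | [] => none
  | c :: cs =>
    if c = '>' then some ([], cs)
    else (splitAtGt cs).map (fun p => (c :: p.1, p.2))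

-- the Python set literal; names are distinct, so an ordered list with `contains` is exact
def supportedTags : List (List Char) :=
  ["b", "i", "u", "s", "strong", "em", "code", "pre", "a"].map String.toList

-- ===== PORT A =====
-- A's while-loop over positions i, transliterated as recursion over the suffix text[i:];
-- fuel = remaining length (each iteration consumes ≥ 1 char).  The Python stack appends/pops
-- at the END of `tags`; here the stack is kept TOP-FIRST (head = Python's tags[-1]).
-- Where Python raises IndexError (`.split()` of an empty name → []), the port drops the tag
-- and continues; those inputs are outside Pre_.
def loopA : Nat → List (List Char) → List (List Char) → List Char →
    List (List Char) × List (List Char)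
  | 0, tags, out, _ => (tags, out)
  | _ + 1, tags, out, [] => (tags, out)
  | n + 1, tags, out, c :: rest =>
    if c = '<' then
      match splitAtGt rest with
      | none => (tags, out ++ [c :: rest])          -- no '>': out.append(text[i:]); break
      | some (inner, after) =>
        let tag := PySem.Chars.strip inner
        let isClosing := PySem.Chars.startswith tag ['/']
        let base := if isClosing then tag.drop 1 else tag
        match PySem.Chars.split₀ base with
        | [] => loopA n tags out after              -- Python raises here (outside Pre_)
        | w :: _ =>
          let name := PySem.Chars.lower w
          if supportedTags.contains name then
            if isClosing then
              match tags with
              | t :: ts =>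
                if t = name then loopA n ts (out ++ ['<' :: (inner ++ ['>'])]) after
                else loopA n tags out after
              | [] => loopA n tags out after
            else loopA n (name :: tags) (out ++ ['<' :: (inner ++ ['>'])]) after
          else loopA n tags out after
    else loopA n tags (out ++ [[c]]) rest

def repair_html_tags_py (text : String) : String :=
  let cs := text.toList
  let st := loopA cs.length [] [] cs
  String.mk (PySem.Chars.join []
    (st.2 ++ st.1.map (fun t => '<' :: '/' :: (t ++ ['>']))))

-- ===== PORT B =====
inductive Tok where
  | txt : List Char → Tok
  | tag : List Char → Tok
deriving DecidableEq, Repr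

-- phase 1 of Source B: `text.find("<", i)` = takeWhile/dropWhile on the suffix; then splitAtGt
def tokenize : Nat → List Char → List Tok
  | _, [] => []
  | 0, _ :: _ => []                                  -- fuel guard (never hit for fuel ≥ length)
  | n + 1, c :: cs =>
    let pre := (c :: cs).takeWhile (fun d => d ≠ '<')
    let rest := (c :: cs).dropWhile (fun d => d ≠ '<')
    match rest with
    | [] => [Tok.txt pre]
    | _ :: r =>
      match splitAtGt r with
      | none => [Tok.txt pre, Tok.txt rest]
      | some (inner, after) => Tok.txt pre :: Tok.tag inner :: tokenize n after

-- per-tag logic of Source B's second pass (stack top-first); returns (new stack, emitted pieces)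
def applyTag (tags : List (List Char)) (inner : List Char) :
    List (List Char) × List (List Char) :=
  let tag := PySem.Chars.strip inner
  let isClosing := PySem.Chars.startswith tag ['/']
  let base := if isClosing then tag.drop 1 else tag
  match PySem.Chars.split₀ base with
  | [] => (tags, [])                                  -- Python raises here (outside Pre_)
  | w :: _ =>
    let name := PySem.Chars.lower w
    if supportedTags.contains name then
      if isClosing then
        match tags with
        | t :: ts => if t = name then (ts, ['<' :: (inner ++ ['>'])]) else (tags, [])
        | [] => (tags, [])
      else (name :: tags, ['<' :: (inner ++ ['>'])])
    else (tags, [])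

-- phase 2 of Source B: the `for kind, payload in tokens` loop
def procB : List (List Char) → List (List Char) → List Tok →
    List (List Char) × List (List Char)
  | tags, out, [] => (tags, out)
  | tags, out, Tok.txt s :: ts => procB tags (out ++ [s]) ts
  | tags, out, Tok.tag inner :: ts =>
    let r := applyTag tags inner
    procB r.1 (out ++ r.2) ts

def repair_html_tags_py_alt (text : String) : String :=
  let cs := text.toList
  let st := procB [] [] (tokenize cs.length cs)
  String.mk (PySem.Chars.join []
    (st.2 ++ st.1.map (fun t => '<' :: '/' :: (t ++ ['>']))))

-- ===== PRECONDITION & SPEC =====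
-- helpers for Pre_: a "bad" tag is '<' ws* '>' or '<' ws* '/' ws* '>' — there the Python
-- programs raise IndexError (empty tag name).
def pvClosesAfterSlash : List Char → Bool
  | [] => false
  | c :: cs => if c = '>' then true else if PySem.Chars.isspace c then pvClosesAfterSlash cs else false

def pvBadAfterLt : List Char → Bool
  | [] => false
  | c :: cs =>
    if c = '>' then true
    else if PySem.Chars.isspace c then pvBadAfterLt cs
    else if c = '/' then pvClosesAfterSlash cs else false

def pvHasBadTag : List Char → Bool
  | [] => false
  | c :: cs => (c = '<' && pvBadAfterLt cs) || pvHasBadTag cs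

-- Pre_ excludes strings containing a name-less tag pattern '<'ws*'>' or '<'ws*'/'ws*'>', on which
-- the Python A raises IndexError (split()[0] on an empty tag name); it is slightly conservative:
-- the same pattern occurring INSIDE the inner text of an enclosing tag (e.g. "<a <>") is also
-- excluded although A then returns normally — A and B agree there too (see cites).
def Pre_repair_html_tags_py (text : String) : Prop := pvHasBadTag text.toList = false
instance (text : String) : Decidable (Pre_repair_html_tags_py text) := by
  unfold Pre_repair_html_tags_py; infer_instance

def pvWitness_repair_html_tags_py : String := "<b>hi <i>x</i>"

def Spec_repair_html_tags_py (text : String) (out : String) : Prop := out = repair_html_tags_py_alt text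
instance (text : String) (out : String) : Decidable (Spec_repair_html_tags_py text out) := by
  unfold Spec_repair_html_tags_py; infer_instance

-- ===== CLAIM (what is proved, stated in full; the proofs are below) =====
def Claim_equal_repair_html_tags_py : Prop := ∀ (text : String), Dom_repair_html_tags_py text → Pre_repair_html_tags_py text → Spec_repair_html_tags_py text (repair_html_tags_py text)

-- ===== LEMMAS AND PROOFS =====

lemma splitAtGt_sound {cs inner after : List Char}
    (h : splitAtGt cs = some (inner, after)) : cs = inner ++ '>' :: after := by
  induction cs generalizing inner with
  | nil => simp [splitAtGt] at h
  | cons c cs ih =>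
    by_cases hc : c = '>'
    · simp [splitAtGt, hc] at h
      simp [hc, h.1, h.2]
    · simp [splitAtGt, hc] at h
      obtain ⟨a, ha, hin⟩ := h
      subst hin
      simpa using ih ha

lemma splitAtGt_len {cs inner after : List Char}
    (h : splitAtGt cs = some (inner, after)) : after.length < cs.length := by
  have := splitAtGt_sound h
  subst this; simp; omega

lemma tokFuel : ∀ (n m : Nat) (cs : List Char), cs.length ≤ n → cs.length ≤ m →
    tokenize n cs = tokenize m cs := by
  intro n
  induction n with
  | zero =>
    intro m cs hn _
    have : cs = [] := by cases cs <;> simp_all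
    subst this; cases m <;> simp [tokenize]
  | succ n ih =>
    intro m cs hn hm
    cases cs with
    | nil => cases m <;> simp [tokenize]
    | cons c cs =>
      cases m with
      | zero => simp at hm
      | succ m =>
        cases hrest : (c :: cs).dropWhile (fun d => d ≠ '<') with
        | nil => simp only [tokenize, hrest]
        | cons x r =>
          cases hsp : splitAtGt r with
          | none => simp only [tokenize, hrest, hsp]
          | some p =>
            obtain ⟨inner, after⟩ := p
            have hr : (x :: r).length ≤ (c :: cs).length := by
              rw [← hrest]; exact List.length_dropWhile_le _ _
            have hlen := splitAtGt_len hsp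
            simp only [tokenize, hrest, hsp]
            rw [ih m after (by simp at hr hn ⊢; omega) (by simp at hr hm ⊢; omega)]

lemma procCongr : ∀ (ts : List Tok) (tags out1 out2 : List (List Char)),
    out1.flatten = out2.flatten →
    (procB tags out1 ts).1 = (procB tags out2 ts).1 ∧
    (procB tags out1 ts).2.flatten = (procB tags out2 ts).2.flatten := by
  intro ts
  induction ts with
  | nil => intro tags out1 out2 h; simpa [procB] using h
  | cons t ts ih =>
    intro tags out1 out2 h
    cases t with
    | txt s => exact ih _ (out1 ++ [s]) (out2 ++ [s]) (by simp [h])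
    | tag inner =>
      exact ih _ (out1 ++ (applyTag tags inner).2) (out2 ++ (applyTag tags inner).2) (by simp [h])

lemma joinNilFlatten : ∀ (xs : List (List Char)), PySem.Chars.join [] xs = xs.flatten := by
  intro xs
  induction xs with
  | nil => simp [PySem.Chars.join_nil]
  | cons x xs ih =>
    cases xs with
    | nil => simp [PySem.Chars.join_singleton]
    | cons y ys => rw [PySem.Chars.join_cons_cons, ih]; simp

-- stepping B past one literal character c (c ≠ '<') equals merging c into the next token
lemma tokStep {c : Char} (hc : ¬ c = '<') : ∀ (m : Nat) (cs : List Char)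
    (tags out : List (List Char)), cs.length ≤ m →
    (procB tags out (tokenize (m + 1) (c :: cs))).1
      = (procB tags (out ++ [[c]]) (tokenize cs.length cs)).1 ∧
    (procB tags out (tokenize (m + 1) (c :: cs))).2.flatten
      = (procB tags (out ++ [[c]]) (tokenize cs.length cs)).2.flatten := by
  intro m cs tags out hm
  cases cs with
  | nil =>
    simp [tokenize, List.takeWhile, hc, procB]
  | cons d ds =>
    have htw : (c :: d :: ds).takeWhile (fun x => x ≠ '<')
        = c :: (d :: ds).takeWhile (fun x => x ≠ '<') := by
      simp [List.takeWhile, hc]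
    have hdw : (c :: d :: ds).dropWhile (fun x => x ≠ '<')
        = (d :: ds).dropWhile (fun x => x ≠ '<') := by
      simp [List.dropWhile, hc]
    have hl : (d :: ds).length = ds.length + 1 := rfl
    rw [hl]
    cases hrest : (d :: ds).dropWhile (fun x => x ≠ '<') with
    | nil =>
      simp only [tokenize]
      rw [htw, hdw, hrest]
      simp [procB]
    | cons x r =>
      cases hsp : splitAtGt r with
      | none =>
        simp only [tokenize]
        rw [htw, hdw, hrest]
        simp [procB, hsp]
      | some p =>
        obtain ⟨inner, after⟩ := p
        have hr : (x :: r).length ≤ (d :: ds).length := by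
          rw [← hrest]; exact List.length_dropWhile_le _ _
        have hlen := splitAtGt_len hsp
        have hfuel : tokenize m after = tokenize ds.length after := by
          apply tokFuel <;> (simp at hr hlen ⊢; omega)
        simp only [tokenize]
        rw [htw, hdw, hrest]
        simp only [hsp, hfuel, procB]
        exact procCongr _ _ _ _ (by simp)

-- the tag-handling block inlined in loopA IS applyTag
lemma loopA_tag (n : Nat) (tags out : List (List Char)) {rest inner after : List Char}
    (hsp : splitAtGt rest = some (inner, after)) :
    loopA (n + 1) tags out ('<' :: rest)
      = loopA n (applyTag tags inner).1 (out ++ (applyTag tags inner).2) after := by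
  simp only [loopA, hsp, applyTag]
  cases PySem.Chars.split₀ (if PySem.Chars.startswith (PySem.Chars.strip inner) ['/']
      then (PySem.Chars.strip inner).drop 1 else PySem.Chars.strip inner) with
  | nil => simp
  | cons w ws =>
    by_cases h1 : PySem.Chars.lower w ∈ supportedTags
    · by_cases h2 : PySem.Chars.startswith (PySem.Chars.strip inner) ['/']
      · cases tags with
        | nil => simp [h1, h2]
        | cons t ts =>
          by_cases h3 : t = PySem.Chars.lower w
          · simp [h1, h2, h3]
          · simp [h1, h2, h3]
      · simp [h1, h2]
    · simp [h1]

lemma mainLemma : ∀ (n : Nat) (cs : List Char) (tags out1 out2 : List (List Char)),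
    cs.length ≤ n → out1.flatten = out2.flatten →
    (loopA n tags out1 cs).1 = (procB tags out2 (tokenize cs.length cs)).1 ∧
    (loopA n tags out1 cs).2.flatten = (procB tags out2 (tokenize cs.length cs)).2.flatten := by
  intro n
  induction n with
  | zero =>
    intro cs tags out1 out2 hn hout
    have : cs = [] := by cases cs <;> simp_all
    subst this
    simpa [loopA, tokenize, procB] using hout
  | succ n ih =>
    intro cs tags out1 out2 hn hout
    cases cs with
    | nil => simpa [loopA, tokenize, procB] using hout
    | cons c cs =>
      by_cases hc : c = '<'
      · subst hc
        have htw : ('<' :: cs).takeWhile (fun x => x ≠ '<') = [] := by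
          simp [List.takeWhile]
        have hdw : ('<' :: cs).dropWhile (fun x => x ≠ '<') = '<' :: cs := by
          simp [List.dropWhile]
        have hl : ('<' :: cs).length = cs.length + 1 := rfl
        rw [hl]
        cases hsp : splitAtGt cs with
        | none =>
          simp only [tokenize]
          rw [htw, hdw]
          simp [loopA, hsp, procB, hout]
        | some p =>
          obtain ⟨inner, after⟩ := p
          have hlen := splitAtGt_len hsp
          rw [loopA_tag n tags out1 hsp]
          simp only [tokenize]
          rw [htw, hdw]
          simp only [hsp, procB]
          have hfuel : tokenize cs.length after = tokenize after.length after := by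
            apply tokFuel <;> omega
          rw [hfuel]
          exact ih after (applyTag tags inner).1 (out1 ++ (applyTag tags inner).2)
            (out2 ++ [[]] ++ (applyTag tags inner).2) (by simp at hn; omega)
            (by simp [hout])
      · -- literal character
        simp only [loopA, if_neg hc]
        have hstep := tokStep hc cs.length cs tags out2 (le_refl _)
        have hcs : (c :: cs).length = cs.length + 1 := by simp
        rw [hcs]
        refine ⟨?_, ?_⟩
        · rw [hstep.1]
          exact (ih cs tags (out1 ++ [[c]]) (out2 ++ [[c]]) (by simp at hn; omega)
            (by simp [hout])).1
        · rw [hstep.2]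
          exact (ih cs tags (out1 ++ [[c]]) (out2 ++ [[c]]) (by simp at hn; omega)
            (by simp [hout])).2

-- ===== VERDICT (by name: the statement is the Claim_ definition above) =====
theorem repair_html_tags_py_spec : Claim_equal_repair_html_tags_py := by
  intro text _ _
  unfold Spec_repair_html_tags_py repair_html_tags_py repair_html_tags_py_alt
  have h := mainLemma text.toList.length text.toList [] [] [] (le_refl _) rfl
  simp only [joinNilFlatten, List.flatten_append]
  rw [h.1, h.2]
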